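-- pv_equiv track=rewrite | github.com/Badral12/chess-analysis | early_game_bodolt.py | create_possible_bishop_moves
-- ===== SOURCE A (Python) =====
-- def create_possible_bishop_moves(i, j):
--     possible_moves = []
--     for k in range(1, 8):
--         for l in range(1, 8):
--             if k == l :
--                 possible_moves.append((i - k, j - l))
--                 possible_moves.append((i + k, j + l))
--                 possible_moves.append((i + k, j - l))
--                 possible_moves.append((i - k, j + l))
--
--     return possible_moves
-- ===== SOURCE B (Python) =====
-- def create_possible_bishop_moves(i, j):
--     directions = [(-1, -1), (1, 1), (1, -1), (-1, 1)]
--     return [(i + dx * k, j + dy * k) for k in range(1, 8) for dx, dy in directions]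
-- ===== Notes on version B (the rewrite author's own statement) =====
-- stated objective: simpler
-- what changed: Replaces the nested 7x7 append loop with its k==l filter by a data-driven direction table and a single flat comprehension over diagonal distances 1..7.
import Mathlib
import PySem

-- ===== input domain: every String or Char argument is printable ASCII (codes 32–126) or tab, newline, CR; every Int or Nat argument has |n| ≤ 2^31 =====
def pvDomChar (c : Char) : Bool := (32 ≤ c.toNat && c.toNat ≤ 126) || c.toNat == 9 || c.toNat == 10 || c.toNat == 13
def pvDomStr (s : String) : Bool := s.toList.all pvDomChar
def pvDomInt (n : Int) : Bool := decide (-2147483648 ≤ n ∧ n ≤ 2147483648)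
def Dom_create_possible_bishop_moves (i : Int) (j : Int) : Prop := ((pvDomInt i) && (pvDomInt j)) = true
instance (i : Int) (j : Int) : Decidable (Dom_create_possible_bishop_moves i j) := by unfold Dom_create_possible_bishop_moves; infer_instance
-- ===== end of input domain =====

-- B: a direction table and a flat map over diagonal distances 1..7 instead of A's nested 7x7 append loop filtered by k==l; simpler, identical output.


-- ===== PORT A =====
-- literal port of A: nested loops over pyRange 1..8 with the k == l guard, appending four tuples
def create_possible_bishop_moves (i : Int) (j : Int) : List (Int × Int) :=
  (PySem.List.pyRange 1 8 1).foldl (fun acc k =>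
    (PySem.List.pyRange 1 8 1).foldl (fun acc l =>
      if k == l then
        ((((acc ++ [(i - k, j - l)]) ++ [(i + k, j + l)]) ++ [(i + k, j - l)]) ++ [(i - k, j + l)])
      else acc) acc) []

-- ===== PORT B =====
-- port of B: a flat comprehension over distances k = 1..7, scaling a fixed direction table
def create_possible_bishop_moves_alt (i : Int) (j : Int) : List (Int × Int) :=
  let directions : List (Int × Int) := [(-1, -1), (1, 1), (1, -1), (-1, 1)]
  (PySem.List.pyRange 1 8 1).flatMap (fun k =>
    directions.map (fun d => (i + d.1 * k, j + d.2 * k)))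

-- ===== PRECONDITION & SPEC =====
def Spec_create_possible_bishop_moves (i : Int) (j : Int) (out : List (Int × Int)) : Prop := out = create_possible_bishop_moves_alt i j
instance (i : Int) (j : Int) (out : List (Int × Int)) : Decidable (Spec_create_possible_bishop_moves i j out) := by unfold Spec_create_possible_bishop_moves; infer_instance

-- ===== CLAIM (what is proved, stated in full; the proofs are below) =====
def Claim_equal_create_possible_bishop_moves : Prop := ∀ (i : Int) (j : Int), Dom_create_possible_bishop_moves i j → Spec_create_possible_bishop_moves i j (create_possible_bishop_moves i j)

-- ===== LEMMAS AND PROOFS =====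

-- ===== VERDICT (by name: the statement is the Claim_ definition above) =====
theorem create_possible_bishop_moves_spec : Claim_equal_create_possible_bishop_moves := by
  intro i j _
  show create_possible_bishop_moves i j = create_possible_bishop_moves_alt i j
  simp [create_possible_bishop_moves, create_possible_bishop_moves_alt,
    PySem.List.pyRange, List.range_succ]
  omega
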